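-- pv_equiv track=rewrite | github.com/paloblanco/bank_ocr | tests/bank_ocr.py | split_raw_line_to_raw_digits
-- ===== SOURCE A (Python) =====
-- def split_raw_line_to_raw_digits(account_raw: str):
--     digits_list = []
--     for digit in range(9):
--         digit_str = ""
--         for row in range(3):
--             index_account_raw = 3*digit + 28*row
--             digit_str += account_raw[index_account_raw:index_account_raw+3]
--             digit_str += "\n"
--         digit_str += "   "
--         digits_list.append(digit_str)
--     return digits_list
-- ===== SOURCE B (Python) =====
-- def split_raw_line_to_raw_digits(account_raw: str):
--     rows = [account_raw[28 * r:28 * r + 27] for r in range(3)]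
--     top, mid, bot = ([row[3 * d:3 * d + 3] for d in range(9)] for row in rows)
--     return [t + "\n" + m + "\n" + b + "\n   " for t, m, b in zip(top, mid, bot)]
-- ===== Notes on version B (the rewrite author's own statement) =====
-- stated objective: idiomatic
-- what changed: B first slices the line into the three 27-char OCR rows, chunks each row into nine 3-char pieces, and zips the three chunk lists into digit blocks (row-major build then transpose), replacing A's per-digit flat-index arithmetic 3*digit+28*row.
import Mathlib
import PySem

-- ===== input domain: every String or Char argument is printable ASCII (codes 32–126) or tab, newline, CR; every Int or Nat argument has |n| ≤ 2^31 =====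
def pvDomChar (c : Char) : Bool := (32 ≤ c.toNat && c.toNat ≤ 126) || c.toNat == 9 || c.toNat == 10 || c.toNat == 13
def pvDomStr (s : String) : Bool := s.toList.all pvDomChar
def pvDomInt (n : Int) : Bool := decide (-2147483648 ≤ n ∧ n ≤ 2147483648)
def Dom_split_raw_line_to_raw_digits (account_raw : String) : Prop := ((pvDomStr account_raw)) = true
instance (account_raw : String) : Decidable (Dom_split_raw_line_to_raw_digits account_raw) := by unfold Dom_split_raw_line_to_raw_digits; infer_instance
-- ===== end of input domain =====

-- B builds the three OCR rows first, chunks each row into nine 3-char slices, and zips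
-- the rows' chunks into the digit blocks (row-major, then transpose) instead of A's
-- per-digit flat-index arithmetic; same cost, more idiomatic decomposition.

-- ===== PORT A =====
def split_raw_line_to_raw_digits (account_raw : String) : List String :=
  (PySem.List.pyRange 0 9 1).foldl (fun digits_list digit =>
    let digit_str :=
      (PySem.List.pyRange 0 3 1).foldl (fun digit_str row =>
        let index_account_raw := 3 * digit + 28 * row
        (digit_str ++ PySem.Str.slice account_raw (some index_account_raw) (some (index_account_raw + 3))) ++ "\n") ""
    digits_list ++ [digit_str ++ "   "]) []

-- ===== PORT B =====
def split_raw_line_to_raw_digits_alt (account_raw : String) : List String :=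
  let rows := (PySem.List.pyRange 0 3 1).map (fun r =>
    PySem.Str.slice account_raw (some (28 * r)) (some (28 * r + 27)))
  let chunks := fun (row : String) =>
    (PySem.List.pyRange 0 9 1).map (fun d =>
      PySem.Str.slice row (some (3 * d)) (some (3 * d + 3)))
  match rows with
  | [rtop, rmid, rbot] =>
      ((chunks rtop).zip ((chunks rmid).zip (chunks rbot))).map
        (fun tmb => tmb.1 ++ "\n" ++ tmb.2.1 ++ "\n" ++ tmb.2.2 ++ "\n   ")
  | _ => []

-- ===== PRECONDITION & SPEC =====
def Spec_split_raw_line_to_raw_digits (account_raw : String) (out : List String) : Prop := out = split_raw_line_to_raw_digits_alt account_raw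
instance (account_raw : String) (out : List String) : Decidable (Spec_split_raw_line_to_raw_digits account_raw out) := by unfold Spec_split_raw_line_to_raw_digits; infer_instance

-- ===== CLAIM (what is proved, stated in full; the proofs are below) =====
def Claim_equal_split_raw_line_to_raw_digits : Prop := ∀ (account_raw : String), Dom_split_raw_line_to_raw_digits account_raw → Spec_split_raw_line_to_raw_digits account_raw (split_raw_line_to_raw_digits account_raw)

-- ===== LEMMAS AND PROOFS =====

-- composing the row slice with the chunk slice equals the flat slice
theorem pv_chunk_comp (l : List Char) (a o : ℕ) (h : o + 3 ≤ 27) :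
    List.take 3 (List.drop o (List.take 27 (List.drop a l))) = List.take 3 (List.drop (a + o) l) := by
  rw [List.drop_take, List.take_take, List.drop_drop]
  congr 1
  omega

theorem pv_main (s : String) :
    split_raw_line_to_raw_digits s = split_raw_line_to_raw_digits_alt s := by
  unfold split_raw_line_to_raw_digits split_raw_line_to_raw_digits_alt
  rw [PySem.List.foldl_append_singleton_eq_map]
  rw [show PySem.List.pyRange 0 3 1 = [0, 1, 2] from by decide]
  simp only [List.foldl, List.map, List.zip_map']
  rw [List.nil_append, List.map_map]
  apply List.map_congr_left
  intro d hd
  rw [PySem.List.mem_pyRange_one] at hd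
  lift d to ℕ using hd.1 with k
  rw [← String.toList_inj]
  simp only [String.toList_append, PySem.Str.toList_slice, PySem.Chars.slice_eq_listSlice, Function.comp]
  have hk9 : k < 9 := by exact_mod_cast hd.2
  norm_cast
  simp only [PySem.List.slice_natCast]
  simp only [Nat.add_sub_cancel_left]
  rw [pv_chunk_comp s.toList (28*0) (3*k) (by omega), pv_chunk_comp s.toList (28*1) (3*k) (by omega),
      pv_chunk_comp s.toList (28*2) (3*k) (by omega)]
  simp only [show ∀ r, 28 * r + 3 * k = 3 * k + 28 * r from fun r => Nat.add_comm _ _]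
  simp [List.append_assoc]

-- ===== VERDICT (by name: the statement is the Claim_ definition above) =====
theorem split_raw_line_to_raw_digits_spec : Claim_equal_split_raw_line_to_raw_digits := by
  intro s _
  exact pv_main s
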